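-- pv_equiv track=rewrite | github.com/bhyun/daily-algorithm | 2021/BOJ1059_좋은 구간.py | solution
-- ===== SOURCE A (Python) =====
-- def solution(l, s, n):
--     # s 정렬
--     s.sort()
--
--     if n in s:
--         return 0
--
--     # start, end 초기값 설정
--     start = 1
--     end = s[-1] - 1
--
--     # start, end 위치찾기
--     for idx, val in enumerate(s):
--         if val < n:
--             start = val + 1
--         else:
--             end = val - 1
--             break
--     return (n - start + 1) * (end - n + 1) - 1
-- ===== SOURCE B (Python) =====
-- def solution(l, s, n):
--     # Single O(L) scan via C-level builtins instead of sorting; does not mutate s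
--     # (A sorts s in place; equivalence here is about the return value only).
--     if n in s:
--         return 0
--     start = max((v + 1 for v in s if v < n), default=1)
--     end = min((v - 1 for v in s if v > n), default=max(s) - 1)
--     return (n - start + 1) * (end - n + 1) - 1
-- ===== Notes on version B (the rewrite author's own statement) =====
-- stated objective: faster
-- what changed: Replaces the in-place sort plus linear scan with three direct linear extrema passes (max of values below n, min of values above n, overall max), leaving s unmutated.
import Mathlib
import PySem

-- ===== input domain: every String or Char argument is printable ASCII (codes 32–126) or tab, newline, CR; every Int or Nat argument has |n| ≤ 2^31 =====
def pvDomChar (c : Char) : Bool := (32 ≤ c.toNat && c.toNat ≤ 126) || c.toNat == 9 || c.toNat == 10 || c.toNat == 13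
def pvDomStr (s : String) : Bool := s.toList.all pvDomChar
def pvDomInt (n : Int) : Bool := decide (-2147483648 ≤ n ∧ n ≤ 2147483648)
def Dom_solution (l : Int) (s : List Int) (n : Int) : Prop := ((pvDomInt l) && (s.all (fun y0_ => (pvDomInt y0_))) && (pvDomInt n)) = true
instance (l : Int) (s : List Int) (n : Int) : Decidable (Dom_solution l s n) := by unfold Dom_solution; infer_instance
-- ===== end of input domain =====

-- B avoids the sort: it finds nearest-below / nearest-above / max of s in single
-- C-level scans.  A sorts s in place; the equivalence is about the return value only.

-- ===== PORT A =====
-- the 'for idx, val in enumerate(s)' loop with its break: updates start while val < n,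
-- sets end and stops at the first val ≥ n
def solutionLoop (n : Int) : List Int → Int → Int → Int × Int
  | [], start, en => (start, en)
  | v :: rest, start, en =>
    if v < n then solutionLoop n rest (v + 1) en else (start, v - 1)

def solution (l : Int) (s : List Int) (n : Int) : Int :=
  let ss := PySem.List.sorted s (fun x => x) false
  if n ∈ ss then 0
  else
    -- s[-1]: Pre_solution excludes s = [] (IndexError in Python), so the default is unreachable
    let en0 := (PySem.List.pyGet? ss (-1)).getD 0 - 1
    let p := solutionLoop n ss 1 en0
    (n - p.1 + 1) * (p.2 - n + 1) - 1

-- ===== PORT B =====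
def solution_alt (l : Int) (s : List Int) (n : Int) : Int :=
  if n ∈ s then 0
  else
    let start := (PySem.List.max? ((s.filter (fun v => v < n)).map (fun v => v + 1)) (fun x => x)).getD 1
    let en := (PySem.List.min? ((s.filter (fun v => n < v)).map (fun v => v - 1)) (fun x => x)).getD
                ((PySem.List.max? s (fun x => x)).getD 0 - 1)
    (n - start + 1) * (en - n + 1) - 1

-- ===== PRECONDITION & SPEC =====
-- Python A raises IndexError on s = [] (s[-1]); B also raises there (max(s) of an empty list).
def Pre_solution (l : Int) (s : List Int) (n : Int) : Prop := s ≠ []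
instance (l : Int) (s : List Int) (n : Int) : Decidable (Pre_solution l s n) := by unfold Pre_solution; infer_instance
def pvWitness_solution : Int × List Int × Int := (1, [3, 7], 5)

def Spec_solution (l : Int) (s : List Int) (n : Int) (out : Int) : Prop := out = solution_alt l s n
instance (l : Int) (s : List Int) (n : Int) (out : Int) : Decidable (Spec_solution l s n out) := by unfold Spec_solution; infer_instance

-- ===== CLAIM (what is proved, stated in full; the proofs are below) =====
def Claim_equal_solution : Prop := ∀ (l : Int) (s : List Int) (n : Int), Dom_solution l s n → Pre_solution l s n → Spec_solution l s n (solution l s n)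


-- ===== LEMMAS AND PROOFS =====

-- A's loop on a nondecreasing list not containing n: start = (last value below n) + 1,
-- end = (first value above n) - 1, with the given defaults.
lemma solutionLoop_spec (n : Int) (xs : List Int) (hpw : xs.Pairwise (· ≤ ·)) (hn : n ∉ xs)
    (s0 e0 : Int) :
    solutionLoop n xs s0 e0 =
      (((xs.filter (fun v => v < n)).getLast?.map (fun v => v + 1)).getD s0,
       ((xs.filter (fun v => n < v)).head?.map (fun v => v - 1)).getD e0) := by
  induction xs generalizing s0 with
  | nil => simp [solutionLoop]
  | cons v rest ih =>
    have hv_le : ∀ x ∈ rest, v ≤ x := (List.pairwise_cons.mp hpw).1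
    have hpw' : rest.Pairwise (· ≤ ·) := (List.pairwise_cons.mp hpw).2
    have hnv : n ≠ v := by simp at hn; tauto
    have hnr : n ∉ rest := by simp at hn; tauto
    by_cases hv : v < n
    · simp only [solutionLoop, if_pos hv]
      rw [ih hpw' hnr]
      have h2 : ¬ (n < v) := by omega
      simp only [List.filter_cons, hv, h2, decide_true, decide_false, if_true]
      cases hfl : rest.filter (fun v => decide (v < n)) with
      | nil => simp
      | cons a t => simp [List.getLast?_cons]
    · have hnv' : n < v := by omega
      simp only [solutionLoop, if_neg hv]
      have h1 : (v :: rest).filter (fun v => decide (v < n)) = [] := by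
        rw [List.filter_eq_nil_iff]
        intro x hx
        rcases List.mem_cons.mp hx with h | h
        · subst h; simp; omega
        · have := hv_le x h; simp; omega
      have h2 : (v :: rest).filter (fun v => decide (n < v)) = v :: rest.filter (fun v => decide (n < v)) := by
        simp [hnv']
      rw [h1, h2]
      simp

-- running max from x over a list whose head dominates x: the last element wins
lemma foldl_max_eq_getLastD (t : List Int) (x : Int) (h : (x :: t).Pairwise (· ≤ ·)) :
    t.foldl max x = t.getLastD x := by
  induction t generalizing x with
  | nil => rfl
  | cons y t' ih =>
    have hxy : x ≤ y := (List.pairwise_cons.mp h).1 y (by simp)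
    have h' : (y :: t').Pairwise (· ≤ ·) := (List.pairwise_cons.mp h).2
    simp only [List.foldl_cons, List.getLastD_cons]
    rw [max_eq_right hxy]
    exact ih y h'

lemma foldl_min_of_le (t : List Int) (x : Int) (h : ∀ y ∈ t, x ≤ y) :
    t.foldl min x = x := by
  induction t with
  | nil => rfl
  | cons y t' ih =>
    simp only [List.foldl_cons]
    rw [min_eq_left (h y (by simp))]
    exact ih (fun y hy => h y (by simp [hy]))

-- max of a nondecreasing Int list is its last element
lemma max?_id_eq_getLast? (xs : List Int) (h : xs.Pairwise (· ≤ ·)) :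
    PySem.List.max? xs (fun x => x) = xs.getLast? := by
  cases xs with
  | nil => simp [PySem.List.max?_eq_none_iff]
  | cons x t =>
    rw [PySem.List.max?_id_cons, foldl_max_eq_getLastD t x h]
    simp [List.getLast?_cons]

-- min of a nondecreasing Int list is its head
lemma min?_id_eq_head? (xs : List Int) (h : xs.Pairwise (· ≤ ·)) :
    PySem.List.min? xs (fun x => x) = xs.head? := by
  cases xs with
  | nil => simp [PySem.List.min?_eq_none_iff]
  | cons x t =>
    rw [PySem.List.min?_id_cons,
        foldl_min_of_le t x (fun y hy => List.rel_of_pairwise_cons h hy)]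
    rfl

-- max/min over the identity key only depend on the multiset of elements
lemma max?_id_perm (xs ys : List Int) (h : xs.Perm ys) :
    PySem.List.max? xs (fun x => x) = PySem.List.max? ys (fun x => x) := by
  cases hx : PySem.List.max? xs (fun x => x) with
  | none =>
    have : xs = [] := (PySem.List.max?_eq_none_iff _ _).mp hx
    subst this
    have hy : ys = [] := h.nil_eq.symm
    subst hy
    exact hx.symm
  | some m =>
    cases hy : PySem.List.max? ys (fun x => x) with
    | none =>
      have : ys = [] := (PySem.List.max?_eq_none_iff _ _).mp hy
      subst this
      have := h.eq_nil
      simp_all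
    | some m' =>
      have hm : m ∈ xs := PySem.List.max?_mem hx
      have hm' : m' ∈ ys := PySem.List.max?_mem hy
      have h1 : m ≤ m' := PySem.List.max?_isMax hy m (h.mem_iff.mp hm)
      have h2 : m' ≤ m := PySem.List.max?_isMax hx m' (h.mem_iff.mpr hm')
      have : m = m' := le_antisymm h1 h2
      simp [this]

lemma min?_id_perm (xs ys : List Int) (h : xs.Perm ys) :
    PySem.List.min? xs (fun x => x) = PySem.List.min? ys (fun x => x) := by
  cases hx : PySem.List.min? xs (fun x => x) with
  | none =>
    have : xs = [] := (PySem.List.min?_eq_none_iff _ _).mp hx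
    subst this
    have hy : ys = [] := h.nil_eq.symm
    subst hy
    exact hx.symm
  | some m =>
    cases hy : PySem.List.min? ys (fun x => x) with
    | none =>
      have : ys = [] := (PySem.List.min?_eq_none_iff _ _).mp hy
      subst this
      have := h.eq_nil
      simp_all
    | some m' =>
      have hm : m ∈ xs := PySem.List.min?_mem hx
      have hm' : m' ∈ ys := PySem.List.min?_mem hy
      have h1 : m ≤ m' := PySem.List.min?_isMin hx m' (h.mem_iff.mpr hm')
      have h2 : m' ≤ m := PySem.List.min?_isMin hy m (h.mem_iff.mp hm)
      have : m = m' := le_antisymm h1 h2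
      simp [this]

-- ===== VERDICT (by name: the statement is the Claim_ definition above) =====
theorem solution_spec : Claim_equal_solution := by
  intro l s n _ _
  unfold Spec_solution solution solution_alt
  set ss := PySem.List.sorted s (fun x => x) false with hss
  have hperm : ss.Perm s := PySem.List.sorted_perm s (fun x => x) false
  have hpw : ss.Pairwise (· ≤ ·) := PySem.List.sorted_pairwise s (fun x => x)
  have hmem : (n ∈ ss) = (n ∈ s) := by
    simp [hperm.mem_iff]
  by_cases hn : n ∈ s
  · simp [hmem, hn]
  · have hns : n ∉ ss := by simp [hmem, hn]
    simp only [hmem, if_neg hn]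
    rw [solutionLoop_spec n ss hpw hns]
    -- start components agree
    have hstart :
        (PySem.List.max? ((s.filter (fun v => v < n)).map (fun v => v + 1)) (fun x => x)).getD 1 =
        (((ss.filter (fun v => v < n)).getLast?.map (fun v => v + 1)).getD 1) := by
      rw [max?_id_perm _ ((ss.filter (fun v => decide (v < n))).map (fun v => v + 1))
            (((hperm.filter _).map _).symm),
          max?_id_eq_getLast? _ (List.Pairwise.map _ (fun a b hab => by omega) (List.Pairwise.filter _ hpw)),
          List.getLast?_map]
    -- end components agree
    have hend :
        (PySem.List.min? ((s.filter (fun v => n < v)).map (fun v => v - 1)) (fun x => x)).getD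
          ((PySem.List.max? s (fun x => x)).getD 0 - 1) =
        (((ss.filter (fun v => n < v)).head?.map (fun v => v - 1)).getD
          ((PySem.List.pyGet? ss (-1)).getD 0 - 1)) := by
      rw [min?_id_perm _ ((ss.filter (fun v => decide (n < v))).map (fun v => v - 1))
            (((hperm.filter _).map _).symm),
          min?_id_eq_head? _ (List.Pairwise.map _ (fun a b hab => by omega) (List.Pairwise.filter _ hpw)),
          List.head?_map,
          max?_id_perm s ss hperm.symm, max?_id_eq_getLast? ss hpw,
          PySem.List.pyGet?_neg_one]
    rw [hstart, hend]
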